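-- pv_equiv track=rewrite | github.com/conditional-team/SENTINEL | tests/python/test_mega_fuzzing.py | detect_reentrancy
-- ===== SOURCE A (Python) =====
-- from typing import List, Dict, Any, Optional, Tuple
--
-- def detect_reentrancy(traces: List[Dict[str, Any]]) -> bool:
--     seen = {}
--     for trace in traces:
--         key = f"{trace['to']}:{trace['selector']}"
--         if key in seen:
--             return True
--         seen[key] = 1
--     return False
-- ===== SOURCE B (Python) =====
-- def detect_reentrancy(traces):
--     keys = sorted(f"{trace['to']}:{trace['selector']}" for trace in traces)
--     return any(x == y for x, y in zip(keys, keys[1:]))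
-- ===== Notes on version B (the rewrite author's own statement) =====
-- stated objective: alternative
-- what changed: B sorts all key strings and detects a duplicate by scanning adjacent pairs of the sorted list, instead of A's single hash-based pass that maintains a seen-dict and returns early on the first repeat.
import Mathlib
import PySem

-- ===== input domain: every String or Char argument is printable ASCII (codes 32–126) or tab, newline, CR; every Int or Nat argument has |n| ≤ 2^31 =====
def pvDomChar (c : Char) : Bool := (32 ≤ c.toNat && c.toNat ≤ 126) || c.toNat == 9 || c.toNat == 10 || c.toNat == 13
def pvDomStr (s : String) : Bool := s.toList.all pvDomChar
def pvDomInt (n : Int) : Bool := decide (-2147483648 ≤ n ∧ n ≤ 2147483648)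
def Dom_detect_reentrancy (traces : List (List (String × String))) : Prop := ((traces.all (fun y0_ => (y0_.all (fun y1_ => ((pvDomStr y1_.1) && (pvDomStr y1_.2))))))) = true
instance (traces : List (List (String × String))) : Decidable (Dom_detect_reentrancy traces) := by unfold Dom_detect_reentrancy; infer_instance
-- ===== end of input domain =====

-- B replaces A's early-returning seen-dict scan by sorting all key strings and scanning
-- adjacent pairs of the sorted list for an equal pair (objective: alternative).

-- ===== PORT A =====
-- key = f"{trace['to']}:{trace['selector']}" ; Pre_ guarantees both lookups succeed (else Python raises KeyError)
def pvKeyA (trace : List (String × String)) : String :=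
  ((PySem.Dict.get? (PySem.Dict.mk trace) "to").getD "") ++ ":" ++
  ((PySem.Dict.get? (PySem.Dict.mk trace) "selector").getD "")

-- the 'for trace in traces' loop with its early return and the seen dict
def pvGoA (ts : List (List (String × String))) (seen : PySem.Dict String Int) : Bool :=
  match ts with
  | [] => false
  | t :: rest =>
    let key := pvKeyA t
    if PySem.Dict.contains seen key then true
    else pvGoA rest (PySem.Dict.insert seen key 1)

def detect_reentrancy (traces : List (List (String × String))) : Bool :=
  pvGoA traces PySem.Dict.empty

-- ===== PORT B =====
def detect_reentrancy_alt (traces : List (List (String × String))) : Bool :=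
  let keys := PySem.List.sorted (traces.map (fun trace =>
    ((PySem.Dict.get? (PySem.Dict.mk trace) "to").getD "") ++ ":" ++
    ((PySem.Dict.get? (PySem.Dict.mk trace) "selector").getD ""))) (fun x => x) false
  (keys.zip keys.tail).any (fun p => p.1 == p.2)

-- ===== PRECONDITION & SPEC =====
-- Pre_ excludes exactly the inputs where a trace lacks the 'to' or 'selector' key: there the
-- Python A (and B) raise KeyError instead of returning.
def Pre_detect_reentrancy (traces : List (List (String × String))) : Prop :=
  ∀ t ∈ traces, "to" ∈ t.map Prod.fst ∧ "selector" ∈ t.map Prod.fst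
instance (traces : List (List (String × String))) : Decidable (Pre_detect_reentrancy traces) := by
  unfold Pre_detect_reentrancy; infer_instance

def pvWitness_detect_reentrancy : (List (List (String × String))) :=
  [[("to", "0xA"), ("selector", "transfer")], [("to", "0xA"), ("selector", "transfer")]]

def Spec_detect_reentrancy (traces : List (List (String × String))) (out : Bool) : Prop := out = detect_reentrancy_alt traces
instance (traces : List (List (String × String))) (out : Bool) : Decidable (Spec_detect_reentrancy traces out) := by unfold Spec_detect_reentrancy; infer_instance

-- ===== CLAIM (what is proved, stated in full; the proofs are below) =====
def Claim_equal_detect_reentrancy : Prop := ∀ (traces : List (List (String × String))), Dom_detect_reentrancy traces → Pre_detect_reentrancy traces → Spec_detect_reentrancy traces (detect_reentrancy traces)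

-- ===== LEMMAS AND PROOFS =====

-- A's loop returns true iff the seen keys together with the remaining keys contain a repeat
theorem pv_goA_eq (ts : List (List (String × String))) (seen : PySem.Dict String Int)
    (hnd : (PySem.Dict.keys seen).Nodup) :
    pvGoA ts seen = !decide ((PySem.Dict.keys seen ++ ts.map pvKeyA).Nodup) := by
  induction ts generalizing seen with
  | nil => simp [pvGoA, hnd]
  | cons t rest ih =>
    by_cases h : PySem.Dict.contains seen (pvKeyA t) = true
    · have hmem : pvKeyA t ∈ PySem.Dict.keys seen :=
        (PySem.Dict.contains_iff_mem_keys _ _).mp h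
      simp only [pvGoA, h, if_pos]
      have hdup : ¬ ((PySem.Dict.keys seen ++ pvKeyA t :: List.map pvKeyA rest).Nodup) := by
        intro hnd2
        rw [List.nodup_append] at hnd2
        exact hnd2.2.2 _ hmem _ (by simp) rfl
      simp [hdup]
    · have hfc : PySem.Dict.contains seen (pvKeyA t) = false := by
        cases hh : PySem.Dict.contains seen (pvKeyA t) <;> simp_all
      have hkeys : PySem.Dict.keys (PySem.Dict.insert seen (pvKeyA t) 1)
          = PySem.Dict.keys seen ++ [pvKeyA t] :=
        PySem.Dict.keys_insert_of_not_contains _ _ hfc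
      have hnd' : (PySem.Dict.keys (PySem.Dict.insert seen (pvKeyA t) 1)).Nodup := by
        rw [hkeys]
        simp [List.nodup_append, hnd]
        intro a ha hax
        exact absurd ((PySem.Dict.contains_iff_mem_keys _ _).mpr (hax ▸ ha)) (by simp [hfc])
      simp only [pvGoA, hfc, Bool.false_eq_true, if_neg, not_false_iff]
      rw [ih _ hnd', hkeys]
      congr 2
      simp

-- on a ≤-sorted list, an equal adjacent pair exists exactly when the list has a duplicate
theorem pv_adj_eq_dup (l : List String) (hp : l.Pairwise (· ≤ ·)) :
    ((l.zip l.tail).any (fun p => p.1 == p.2)) = !decide l.Nodup := by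
  induction l with
  | nil => simp
  | cons a l ih =>
    rcases l with _ | ⟨b, l'⟩
    · simp
    · rw [List.pairwise_cons] at hp
      have hab : a ≤ b := hp.1 b (by simp)
      by_cases he : a = b
      · subst he
        simp [List.nodup_cons]
      · have hnot : a ∉ b :: l' := by
          intro hmem
          have hba : b ≤ a := by
            rcases List.mem_cons.mp hmem with h | h
            · exact (he h).elim
            · exact (List.pairwise_cons.mp hp.2).1 a h
          exact he (le_antisymm hab hba)
        have hrec := ih hp.2
        simp only [List.tail_cons, List.zip_cons_cons, List.any_cons] at hrec ⊢
        rw [show (a == b) = false from beq_eq_false_iff_ne.mpr he, Bool.false_or, hrec]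
        have : (a :: b :: l').Nodup ↔ (b :: l').Nodup := by
          simp only [List.nodup_cons]
          tauto
        rw [decide_eq_decide.mpr this]

-- ===== VERDICT (by name: the statement is the Claim_ definition above) =====
theorem detect_reentrancy_spec : Claim_equal_detect_reentrancy := by
  intro traces _ _
  unfold Spec_detect_reentrancy detect_reentrancy detect_reentrancy_alt
  rw [pv_goA_eq traces PySem.Dict.empty (by simp [PySem.Dict.keys_empty])]
  simp only [PySem.Dict.keys_empty, List.nil_append]
  set keys := traces.map pvKeyA with hk
  show _ = ((PySem.List.sorted keys (fun x => x) false).zip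
      (PySem.List.sorted keys (fun x => x) false).tail).any (fun p => p.1 == p.2)
  rw [pv_adj_eq_dup _ (by simpa using PySem.List.sorted_pairwise keys (fun x => x))]
  have hperm : (PySem.List.sorted keys (fun x => x) false).Perm keys :=
    PySem.List.sorted_perm keys (fun x => x) false
  rw [decide_eq_decide.mpr hperm.nodup_iff.symm]
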